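-- pv_equiv track=rewrite | github.com/IndraPur1/Algorithm-Analysis-and-Strategy | Pertemuan 7/PetaDanau.py | hitungDanau
-- ===== SOURCE A (Python) =====
-- def hitungDanau(peta, x, y):
--     # Inisialisasi array untuk melacak sel yang sudah dikunjungi
--     sudahTerkunjungi = [[False] * y for _ in range(x)]
--
--     # Arah pergerakan: atas, kanan, bawah, kiri (horizontal dan vertikal saja)
--     arah = [(-1, 0), (0, 1), (1, 0), (0, -1)]
--
--     def dfs(i, j):
--         tumpukan = [(i, j)]
--         sudahTerkunjungi[i][j] = True
--         menyentuhTepi = False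
--
--         while tumpukan:
--             r, c = tumpukan.pop()
--
--             # Cek apakah sel ini berada di tepi peta
--             if r == 0 or r == x-1 or c == 0 or c == y-1:
--                 menyentuhTepi = True
--
--             # Jelajahi semua arah yang mungkin
--             for dr, dc in arah:
--                 nr, nc = r + dr, c + dc
--
--                 # Validasi posisi baru
--                 if 0 <= nr < x and 0 <= nc < y:
--                     # Jika air dan belum dikunjungi
--                     if peta[nr][nc] == 0 and not sudahTerkunjungi[nr][nc]:
--                         sudahTerkunjungi[nr][nc] = True
--                         tumpukan.append((nr, nc))
--
--         # Kembalikan apakah air ini menyentuh tepi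
--         return menyentuhTepi
--
--     # Hitung jumlah danau
--     jumlahDanau = 0
--
--     # Periksa setiap sel dalam peta
--     for i in range(x):
--         for j in range(y):
--             # Jika sel adalah air dan belum dikunjungi
--             if peta[i][j] == 0 and not sudahTerkunjungi[i][j]:
--                 # Jika komponen air ini tidak menyentuh tepi, ini adalah danau
--                 if not dfs(i, j):
--                     jumlahDanau += 1
--
--     return jumlahDanau
--
-- peta = []
-- ===== SOURCE B (Python) =====
-- def hitungDanau(peta, x, y):
--     # Set-based level BFS instead of stack DFS: no visited matrix, no per-pop edge flag.
--     water = set()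
--     for i in range(x):
--         for j in range(y):
--             if peta[i][j] == 0:
--                 water.add((i, j))
--     arah = ((-1, 0), (0, 1), (1, 0), (0, -1))
--     jumlah = 0
--     seen = set()
--     for i in range(x):
--         for j in range(y):
--             if (i, j) in water and (i, j) not in seen:
--                 comp = {(i, j)}
--                 frontier = {(i, j)}
--                 while frontier:
--                     frontier = {(a + da, b + db) for (a, b) in frontier
--                                 for (da, db) in arah} & water - comp
--                     comp |= frontier
--                 seen |= comp
--                 if all(0 < a < x - 1 and 0 < b < y - 1 for (a, b) in comp):
--                     jumlah += 1
--     return jumlah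
-- ===== Notes on version B (the rewrite author's own statement) =====
-- stated objective: alternative
-- what changed: Replaces the explicit-stack DFS over a mutable boolean visited matrix (with the edge flag threaded through each pop) by level-synchronous set-algebra BFS: whole-frontier expansion on immutable sets of cells, a 'seen' set instead of the matrix, and a separate interior check over each finished component.
import Mathlib
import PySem

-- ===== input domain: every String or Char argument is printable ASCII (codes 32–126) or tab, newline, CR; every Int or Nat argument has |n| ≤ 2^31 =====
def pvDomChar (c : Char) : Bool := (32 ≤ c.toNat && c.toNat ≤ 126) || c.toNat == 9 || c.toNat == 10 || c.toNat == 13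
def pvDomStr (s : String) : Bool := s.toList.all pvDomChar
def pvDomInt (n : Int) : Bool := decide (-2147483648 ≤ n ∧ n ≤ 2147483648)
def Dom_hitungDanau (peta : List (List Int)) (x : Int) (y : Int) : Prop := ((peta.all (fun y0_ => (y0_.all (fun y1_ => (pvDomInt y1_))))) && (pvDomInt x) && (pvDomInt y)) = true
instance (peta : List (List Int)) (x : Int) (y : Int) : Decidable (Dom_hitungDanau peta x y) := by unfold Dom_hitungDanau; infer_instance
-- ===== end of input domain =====

-- B replaces A's explicit-stack DFS over a mutable visited matrix (edge flag threaded through pops)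
-- by level-synchronous set-algebra BFS with a separate per-component interior check (objective: alternative).

-- ===== PORT A =====
def pvWater (peta : List (List Int)) (r c : Int) : Bool :=
  ((PySem.List.pyGet? peta r).bind (fun row => PySem.List.pyGet? row c)) == some 0

def pvA_get (vis : List (List Bool)) (r c : Int) : Bool :=
  if 0 ≤ r ∧ 0 ≤ c then (vis.getD r.toNat []).getD c.toNat true else true

def pvA_set (vis : List (List Bool)) (r c : Int) : List (List Bool) :=
  vis.set r.toNat ((vis.getD r.toNat []).set c.toNat true)

def pvA_arah : List (Int × Int) := [(-1, 0), (0, 1), (1, 0), (0, -1)]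

def pvA_fc (vis : List (List Bool)) : Nat := (vis.map (fun row => row.count false)).sum

def pvA_push (peta : List (List Int)) (x y r c : Int)
    (st : List (Int × Int) × List (List Bool)) (d : Int × Int) :
    List (Int × Int) × List (List Bool) :=
  let nr := r + d.1
  let nc := c + d.2
  if 0 ≤ nr ∧ nr < x ∧ 0 ≤ nc ∧ nc < y then
    if pvWater peta nr nc = true ∧ pvA_get st.2 nr nc = false then
      ((nr, nc) :: st.1, pvA_set st.2 nr nc)
    else st
  else st

theorem pvA_count_false_set : ∀ (row : List Bool) (n : Nat), row.getD n true = false →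
    (row.set n true).count false < row.count false := by
  intro row
  induction row with
  | nil => intro n h; simp [List.getD] at h
  | cons b bs ih =>
    intro n h
    cases n with
    | zero =>
      simp [List.getD] at h
      subst h
      simp [List.set]
    | succ m =>
      have := ih m (by simpa [List.getD] using h)
      simp [List.set, List.count_cons]
      omega

theorem pvA_fc_set_aux : ∀ (vis : List (List Bool)) (n : Nat) (row' : List Bool),
    n < vis.length → row'.count false < (vis.getD n []).count false →
    pvA_fc (vis.set n row') < pvA_fc vis := by
  intro vis
  induction vis with
  | nil => intro n _ h; simp at h
  | cons r rs ih =>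
    intro n row' hn hlt
    cases n with
    | zero => simp [pvA_fc, List.getD] at *; omega
    | succ m =>
      have := ih m row' (by simpa using hn) (by simpa [List.getD] using hlt)
      simp [pvA_fc, List.set] at *
      omega

theorem pvA_fc_set_lt (vis : List (List Bool)) (r c : Int) (h : pvA_get vis r c = false) :
    pvA_fc (pvA_set vis r c) < pvA_fc vis := by
  unfold pvA_get at h
  split_ifs at h with hrc
  · have hn : r.toNat < vis.length := by
      by_contra hn
      have h2 : vis[r.toNat]? = none := List.getElem?_eq_none (by omega)
      have he : vis.getD r.toNat [] = ([] : List Bool) := by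
        rw [List.getD_eq_getElem?_getD, h2]
        rfl
      rw [he] at h
      simp [List.getD] at h
    exact pvA_fc_set_aux vis r.toNat _ hn (pvA_count_false_set _ _ h)

theorem pvA_push_measure (peta : List (List Int)) (x y r c : Int)
    (st : List (Int × Int) × List (List Bool)) (d : Int × Int) :
    2 * pvA_fc (pvA_push peta x y r c st d).2 + (pvA_push peta x y r c st d).1.length
      ≤ 2 * pvA_fc st.2 + st.1.length := by
  unfold pvA_push
  dsimp only
  split_ifs with h1 h2
  · have := pvA_fc_set_lt st.2 (r + d.1) (c + d.2) h2.2
    simp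
    omega
  · simp
  · simp

theorem pvA_fold_measure (peta : List (List Int)) (x y r c : Int) :
    ∀ (ds : List (Int × Int)) (st : List (Int × Int) × List (List Bool)),
    2 * pvA_fc ((ds.foldl (pvA_push peta x y r c) st).2)
      + ((ds.foldl (pvA_push peta x y r c) st).1).length
      ≤ 2 * pvA_fc st.2 + st.1.length := by
  intro ds
  induction ds with
  | nil => intro st; simp
  | cons d ds ih =>
    intro st
    have h1 := pvA_push_measure peta x y r c st d
    have h2 := ih (pvA_push peta x y r c st d)
    simp only [List.foldl_cons]
    omega

def pvA_dfsLoop (peta : List (List Int)) (x y : Int) :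
    List (Int × Int) → List (List Bool) → Bool → List (List Bool) × Bool
  | [], vis, flag => (vis, flag)
  | (r, c) :: rest, vis, flag =>
    let flag' := flag || decide (r = 0 ∨ r = x - 1 ∨ c = 0 ∨ c = y - 1)
    let st := pvA_arah.foldl (pvA_push peta x y r c) (rest, vis)
    pvA_dfsLoop peta x y st.1 st.2 flag'
  termination_by stack vis _ => 2 * pvA_fc vis + stack.length
  decreasing_by
    have h := pvA_fold_measure peta x y r c pvA_arah (rest, vis)
    simp only [List.length_cons] at *
    omega

def pvA_dfs (peta : List (List Int)) (x y i j : Int) (vis : List (List Bool)) :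
    List (List Bool) × Bool :=
  pvA_dfsLoop peta x y [(i, j)] (pvA_set vis i j) false

def hitungDanau (peta : List (List Int)) (x : Int) (y : Int) : Int :=
  let vis0 := List.replicate x.toNat (List.replicate y.toNat false)
  let res := (PySem.List.pyRange 0 x 1).foldl (fun st i =>
      (PySem.List.pyRange 0 y 1).foldl (fun (st : Int × List (List Bool)) j =>
        if pvWater peta i j = true ∧ pvA_get st.2 i j = false then
          let r := pvA_dfs peta x y i j st.2
          (if r.2 then st.1 else st.1 + 1, r.1)
        else st) st) ((0 : Int), vis0)
  res.1

-- ===== PORT B =====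
def pvB_arah : List (Int × Int) := [(-1, 0), (0, 1), (1, 0), (0, -1)]

def pvB_expand (frontier water comp : PySem.Set (Int × Int)) : PySem.Set (Int × Int) :=
  PySem.Set.diff
    (PySem.Set.inter
      (PySem.Set.ofList (frontier.flatMap
        (fun p => pvB_arah.map (fun d => (p.1 + d.1, p.2 + d.2)))))
      water)
    comp

theorem pvB_countP_lt {α : Type} (l : List α) (p q : α → Bool)
    (hpq : ∀ a ∈ l, q a = true → p a = true)
    (w : α) (hw : w ∈ l) (hp : p w = true) (hq : q w = false) :
    l.countP q < l.countP p := by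
  induction l with
  | nil => simp at hw
  | cons a l ih =>
    rcases List.mem_cons.mp hw with rfl | hw'
    · have hle : l.countP q ≤ l.countP p :=
        List.countP_mono_left (fun a ha h => hpq a (List.mem_cons_of_mem _ ha) h)
      simp [hp, hq]
      omega
    · have := ih (fun a ha h => hpq a (List.mem_cons_of_mem _ ha) h) hw'
      by_cases hqa : q a = true
      · have hpa := hpq a (List.mem_cons_self) hqa
        simp [hpa, hqa]
        omega
      · simp [List.countP_cons, Bool.eq_false_iff.mpr hqa]
        split <;> omega

theorem pvB_measure_lt (water frontier comp : PySem.Set (Int × Int))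
    (h : frontier.isEmpty = false) :
    List.countP (fun w => !(PySem.Set.contains (PySem.Set.union comp (pvB_expand frontier water comp)) w)) water
      + (if (pvB_expand frontier water comp).isEmpty then 0 else 1)
    < List.countP (fun w => !(PySem.Set.contains comp w)) water
      + (if frontier.isEmpty then 0 else 1) := by
  rw [h]
  have hmono : ∀ a ∈ water,
      (!(PySem.Set.contains (PySem.Set.union comp (pvB_expand frontier water comp)) a)) = true →
      (!(PySem.Set.contains comp a)) = true := by
    intro a _ ha
    simp only [Bool.not_eq_true', ← Bool.not_eq_true, PySem.Set.contains_iff] at *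
    exact fun hmem => ha ((PySem.Set.mem_union _ _ _).mpr (Or.inl hmem))
  cases hfe : (pvB_expand frontier water comp).isEmpty with
  | true =>
    have := List.countP_mono_left hmono
    simp only [Bool.false_eq_true, if_false, if_true]
    omega
  | false =>
    have hne : pvB_expand frontier water comp ≠ [] := by
      intro hnil; rw [hnil] at hfe; simp at hfe
    obtain ⟨w, hwmem⟩ := List.exists_mem_of_ne_nil _ hne
    have hw1 := (PySem.Set.mem_diff _ _ _).mp hwmem
    have hw2 := (PySem.Set.mem_inter _ _ _).mp hw1.1
    have hlt := pvB_countP_lt water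
      (fun w => !(PySem.Set.contains comp w))
      (fun w => !(PySem.Set.contains (PySem.Set.union comp (pvB_expand frontier water comp)) w))
      hmono w hw2.2
      (by simp only [Bool.not_eq_true', ← Bool.not_eq_true, PySem.Set.contains_iff]
          exact hw1.2)
      (by have := (PySem.Set.contains_iff (PySem.Set.union comp (pvB_expand frontier water comp)) w).mpr
            ((PySem.Set.mem_union _ _ _).mpr (Or.inr hwmem))
          simp only []
          rw [this]
          rfl)
    omega

def pvB_bfsLoop (water : PySem.Set (Int × Int)) :
    PySem.Set (Int × Int) → PySem.Set (Int × Int) → PySem.Set (Int × Int)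
  | frontier, comp =>
    if frontier.isEmpty then comp
    else
      let f' := pvB_expand frontier water comp
      pvB_bfsLoop water f' (PySem.Set.union comp f')
  termination_by frontier comp =>
    List.countP (fun w => !(PySem.Set.contains comp w)) water
      + (if frontier.isEmpty then 0 else 1)
  decreasing_by
    rename_i hfr
    exact pvB_measure_lt water frontier comp (by simpa using hfr)

def pvB_component (water : PySem.Set (Int × Int)) (s : Int × Int) : PySem.Set (Int × Int) :=
  pvB_bfsLoop water (PySem.Set.add PySem.Set.empty s) (PySem.Set.add PySem.Set.empty s)

def hitungDanau_alt (peta : List (List Int)) (x : Int) (y : Int) : Int :=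
  let water := (PySem.List.pyRange 0 x 1).foldl (fun w i =>
      (PySem.List.pyRange 0 y 1).foldl (fun (w : PySem.Set (Int × Int)) j =>
        if pvWater peta i j = true then PySem.Set.add w (i, j) else w) w) PySem.Set.empty
  let res := (PySem.List.pyRange 0 x 1).foldl (fun st i =>
      (PySem.List.pyRange 0 y 1).foldl (fun (st : Int × PySem.Set (Int × Int)) j =>
        if PySem.Set.contains water (i, j) = true ∧ PySem.Set.contains st.2 (i, j) = false then
          let comp := pvB_component water (i, j)
          (if comp.all (fun p => decide (0 < p.1 ∧ p.1 < x - 1 ∧ 0 < p.2 ∧ p.2 < y - 1)) then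
             st.1 + 1
           else st.1,
           PySem.Set.union st.2 comp)
        else st) st) ((0 : Int), PySem.Set.empty)
  res.1

-- ===== PRECONDITION & SPEC =====
-- Pre_ excludes exactly the inputs on which the Python raises IndexError: when y > 0 the
-- nested loops index peta[i][j] for every 0 <= i < x, 0 <= j < y, so peta needs at least x rows
-- and each of its first x rows needs at least y entries; when y <= 0 no indexing happens.
def Pre_hitungDanau (peta : List (List Int)) (x : Int) (y : Int) : Prop :=
  0 < y → (x.toNat ≤ peta.length ∧ ∀ row ∈ peta.take x.toNat, y.toNat ≤ row.length)
instance (peta : List (List Int)) (x : Int) (y : Int) : Decidable (Pre_hitungDanau peta x y) := by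
  unfold Pre_hitungDanau; infer_instance

def pvWitness_hitungDanau : List (List Int) × Int × Int := ([[0, 1], [1, 0]], 2, 2)

def Spec_hitungDanau (peta : List (List Int)) (x : Int) (y : Int) (out : Int) : Prop := out = hitungDanau_alt peta x y
instance (peta : List (List Int)) (x : Int) (y : Int) (out : Int) : Decidable (Spec_hitungDanau peta x y out) := by unfold Spec_hitungDanau; infer_instance

-- ===== CLAIM (what is proved, stated in full; the proofs are below) =====
def Claim_equal_hitungDanau : Prop := ∀ (peta : List (List Int)) (x : Int) (y : Int), Dom_hitungDanau peta x y → Pre_hitungDanau peta x y → Spec_hitungDanau peta x y (hitungDanau peta x y)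

-- ===== LEMMAS AND PROOFS =====


def pvInR (x y : Int) (p : Int × Int) : Prop := 0 ≤ p.1 ∧ p.1 < x ∧ 0 ≤ p.2 ∧ p.2 < y

def pvWat (peta : List (List Int)) (x y : Int) (p : Int × Int) : Prop :=
  pvInR x y p ∧ pvWater peta p.1 p.2 = true

def pvAdj (peta : List (List Int)) (x y : Int) (p q : Int × Int) : Prop :=
  pvWat peta x y p ∧ pvWat peta x y q ∧ (q.1 - p.1, q.2 - p.2) ∈ pvA_arah

def pvReach (peta : List (List Int)) (x y : Int) (p q : Int × Int) : Prop :=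
  Relation.ReflTransGen (pvAdj peta x y) p q

def pvEdge (x y : Int) (p : Int × Int) : Prop :=
  p.1 = 0 ∨ p.1 = x - 1 ∨ p.2 = 0 ∨ p.2 = y - 1

def pvM (x y : Int) (vis : List (List Bool)) (p : Int × Int) : Prop :=
  pvInR x y p ∧ pvA_get vis p.1 p.2 = true

def pvShape (x y : Int) (vis : List (List Bool)) : Prop :=
  vis.length = x.toNat ∧ ∀ row ∈ vis, row.length = y.toNat

def pvClosed (peta : List (List Int)) (x y : Int) (vis : List (List Bool)) : Prop :=
  ∀ p q, pvM x y vis p → pvAdj peta x y p q → pvM x y vis q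

theorem pvAdj_symm (peta : List (List Int)) (x y : Int) (p q : Int × Int)
    (h : pvAdj peta x y p q) : pvAdj peta x y q p := by
  obtain ⟨hp, hq, hd⟩ := h
  refine ⟨hq, hp, ?_⟩
  simp [pvA_arah, Prod.ext_iff] at hd ⊢
  omega

theorem pvReach_symm (peta : List (List Int)) (x y : Int) (p q : Int × Int)
    (h : pvReach peta x y p q) : pvReach peta x y q p :=
  Relation.ReflTransGen.symmetric (fun _ _ hh => pvAdj_symm peta x y _ _ hh) h

theorem pvReach_wat (peta : List (List Int)) (x y : Int) (s p : Int × Int)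
    (hs : pvWat peta x y s) (h : pvReach peta x y s p) : pvWat peta x y p := by
  induction h with
  | refl => exact hs
  | tail _ hadj _ => exact hadj.2.1

theorem pvReach_closed (peta : List (List Int)) (x y : Int) {W : Int × Int → Prop}
    (hcl : ∀ p q, W p → pvAdj peta x y p q → W q) (s p : Int × Int)
    (hs : W s) (h : pvReach peta x y s p) : W p := by
  induction h with
  | refl => exact hs
  | tail _ hadj ih => exact hcl _ _ ih hadj

theorem pvA_shape_set (x y : Int) (vis : List (List Bool)) (r c : Int)
    (hsh : pvShape x y vis) : pvShape x y (pvA_set vis r c) := by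
  obtain ⟨h1, h2⟩ := hsh
  refine ⟨by simpa [pvA_set] using h1, ?_⟩
  intro row hrow
  unfold pvA_set at hrow
  by_cases hlen : r.toNat < vis.length
  · rcases List.mem_or_eq_of_mem_set hrow with hmem | rfl
    · exact h2 _ hmem
    · rw [List.length_set]
      have hm : vis.getD r.toNat [] ∈ vis := by
        rw [List.getD_eq_getElem _ _ hlen]
        exact List.getElem_mem hlen
      exact h2 _ hm
  · rw [List.set_eq_of_length_le (by omega)] at hrow
    exact h2 _ hrow

theorem pvA_get_set_eq (x y : Int) (vis : List (List Bool)) (r c : Int)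
    (hsh : pvShape x y vis) (hrc : pvInR x y (r, c)) :
    pvA_get (pvA_set vis r c) r c = true := by
  obtain ⟨hlen, hrows⟩ := hsh
  obtain ⟨hr0, hrx, hc0, hcy⟩ := hrc
  simp only at hr0 hrx hc0 hcy
  have hrl : r.toNat < vis.length := by omega
  have hrow : vis.getD r.toNat [] ∈ vis := by
    rw [List.getD_eq_getElem _ _ hrl]; exact List.getElem_mem hrl
  have hrowR : (vis.getD r.toNat []).length = y.toNat := hrows _ hrow
  have hrowR2 : (vis[r.toNat]?.getD []).length = y.toNat := by
    rw [← List.getD_eq_getElem?_getD]; exact hrowR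
  unfold pvA_get pvA_set
  rw [if_pos ⟨hr0, hc0⟩]
  simp only [List.getD_eq_getElem?_getD]
  rw [List.getElem?_set_self (by simpa using hrl)]
  simp only [Option.getD_some]
  rw [List.getElem?_set_self (by omega)]
  rfl

theorem pvA_get_set_ne (x y : Int) (vis : List (List Bool)) (r c a b : Int)
    (hsh : pvShape x y vis) (hrc : pvInR x y (r, c)) (hab : pvInR x y (a, b))
    (hne : (a, b) ≠ (r, c)) :
    pvA_get (pvA_set vis r c) a b = pvA_get vis a b := by
  obtain ⟨hlen, hrows⟩ := hsh
  obtain ⟨hr0, hrx, hc0, hcy⟩ := hrc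
  obtain ⟨ha0, hax, hb0, hby⟩ := hab
  simp only at hr0 hrx hc0 hcy ha0 hax hb0 hby
  have hne' : a ≠ r ∨ b ≠ c := by
    by_contra hcon
    push Not at hcon
    exact hne (Prod.ext hcon.1 hcon.2)
  have hrl : r.toNat < vis.length := by omega
  unfold pvA_get pvA_set
  rw [if_pos ⟨ha0, hb0⟩, if_pos ⟨ha0, hb0⟩]
  by_cases har : a = r
  · have hbc : b ≠ c := by tauto
    subst har
    simp only [List.getD_eq_getElem?_getD]
    rw [List.getElem?_set_self (by simpa using hrl)]
    simp only [Option.getD_some]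
    rw [List.getElem?_set_ne (by omega)]
  · simp only [List.getD_eq_getElem?_getD]
    rw [List.getElem?_set_ne (by omega)]

theorem pvA_M_set_self (x y : Int) (vis : List (List Bool)) (r c : Int)
    (hsh : pvShape x y vis) (hrc : pvInR x y (r, c)) : pvM x y (pvA_set vis r c) (r, c) :=
  ⟨hrc, pvA_get_set_eq x y vis r c hsh hrc⟩

theorem pvA_M_set_mono (x y : Int) (vis : List (List Bool)) (r c : Int) (p : Int × Int)
    (hsh : pvShape x y vis) (hrc : pvInR x y (r, c)) (h : pvM x y vis p) :
    pvM x y (pvA_set vis r c) p := by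
  by_cases he : p = (r, c)
  · subst he
    exact pvA_M_set_self x y vis r c hsh hrc
  · refine ⟨h.1, ?_⟩
    rw [show p.1 = (p.1, p.2).1 from rfl, show p.2 = (p.1, p.2).2 from rfl,
      pvA_get_set_ne x y vis r c p.1 p.2 hsh hrc (by exact h.1) (by simpa using he)]
    exact h.2

theorem pvA_M_set_rev (x y : Int) (vis : List (List Bool)) (r c : Int) (p : Int × Int)
    (hsh : pvShape x y vis) (hrc : pvInR x y (r, c)) (h : pvM x y (pvA_set vis r c) p) :
    p = (r, c) ∨ pvM x y vis p := by
  by_cases he : p = (r, c)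
  · exact Or.inl he
  · right
    refine ⟨h.1, ?_⟩
    have := h.2
    rw [show p.1 = (p.1, p.2).1 from rfl, show p.2 = (p.1, p.2).2 from rfl,
      pvA_get_set_ne x y vis r c p.1 p.2 hsh hrc (by exact h.1) (by simpa using he)] at this
    exact this

theorem pvA_push_shape (peta : List (List Int)) (x y r c : Int)
    (st : List (Int × Int) × List (List Bool)) (d : Int × Int)
    (hsh : pvShape x y st.2) : pvShape x y (pvA_push peta x y r c st d).2 := by
  unfold pvA_push
  dsimp only
  split_ifs
  · exact pvA_shape_set x y st.2 _ _ hsh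
  · exact hsh
  · exact hsh

theorem pvA_push_M_mono (peta : List (List Int)) (x y r c : Int)
    (st : List (Int × Int) × List (List Bool)) (d : Int × Int) (p : Int × Int)
    (hsh : pvShape x y st.2) (h : pvM x y st.2 p) : pvM x y (pvA_push peta x y r c st d).2 p := by
  unfold pvA_push
  dsimp only
  split_ifs with h1 h2
  · exact pvA_M_set_mono x y st.2 _ _ p hsh (by exact h1) h
  · exact h
  · exact h

theorem pvA_push_M_rev (peta : List (List Int)) (x y r c : Int)
    (st : List (Int × Int) × List (List Bool)) (d : Int × Int) (p : Int × Int)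
    (hsh : pvShape x y st.2) (h : pvM x y (pvA_push peta x y r c st d).2 p) :
    pvM x y st.2 p ∨
      (p = (r + d.1, c + d.2) ∧ pvWat peta x y p ∧ ¬ pvM x y st.2 p ∧
        p ∈ (pvA_push peta x y r c st d).1 ∧ pvM x y (pvA_push peta x y r c st d).2 p) := by
  revert h
  unfold pvA_push
  dsimp only
  split_ifs with h1 h2
  · intro h
    rcases pvA_M_set_rev x y st.2 _ _ p hsh (by exact h1) h with he | hm
    · right
      subst he
      refine ⟨rfl, ⟨by exact h1, h2.1⟩, ?_, List.mem_cons_self, h⟩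
      intro hM
      rw [hM.2] at h2
      exact absurd h2.2 (by simp)
    · exact Or.inl hm
  · exact Or.inl
  · exact Or.inl

theorem pvA_push_stack_mono (peta : List (List Int)) (x y r c : Int)
    (st : List (Int × Int) × List (List Bool)) (d : Int × Int) (q : Int × Int)
    (h : q ∈ st.1) : q ∈ (pvA_push peta x y r c st d).1 := by
  unfold pvA_push
  dsimp only
  split_ifs
  · exact List.mem_cons_of_mem _ h
  · exact h
  · exact h

theorem pvA_push_stack_rev (peta : List (List Int)) (x y r c : Int)
    (st : List (Int × Int) × List (List Bool)) (d : Int × Int) (q : Int × Int)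
    (hsh : pvShape x y st.2) (h : q ∈ (pvA_push peta x y r c st d).1) :
    q ∈ st.1 ∨
      (q = (r + d.1, c + d.2) ∧ pvWat peta x y q ∧ ¬ pvM x y st.2 q ∧
        pvM x y (pvA_push peta x y r c st d).2 q) := by
  revert h
  unfold pvA_push
  dsimp only
  split_ifs with h1 h2
  · intro h
    rcases List.mem_cons.mp h with rfl | hmem
    · right
      refine ⟨rfl, ⟨by exact h1, h2.1⟩, ?_, pvA_M_set_self x y st.2 _ _ hsh (by exact h1)⟩
      intro hM
      rw [hM.2] at h2
      exact absurd h2.2 (by simp)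
    · exact Or.inl hmem
  · exact Or.inl
  · exact Or.inl

theorem pvA_push_covers (peta : List (List Int)) (x y r c : Int)
    (st : List (Int × Int) × List (List Bool)) (d : Int × Int)
    (hsh : pvShape x y st.2) (hw : pvWat peta x y (r + d.1, c + d.2)) :
    pvM x y (pvA_push peta x y r c st d).2 (r + d.1, c + d.2) := by
  unfold pvA_push
  dsimp only
  split_ifs with h1 h2
  · exact pvA_M_set_self x y st.2 _ _ hsh (by exact h1)
  · refine ⟨hw.1, ?_⟩
    rcases Bool.eq_false_or_eq_true (pvA_get st.2 (r + d.1) (c + d.2)) with hg | hg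
    · exact hg
    · exact absurd ⟨hw.2, hg⟩ h2
  · exact absurd hw.1 h1

theorem pvA_fold_facts (peta : List (List Int)) (x y r c : Int) :
    ∀ (ds : List (Int × Int)) (st : List (Int × Int) × List (List Bool)),
    (∀ d ∈ ds, d ∈ pvA_arah) → pvShape x y st.2 →
    pvShape x y (ds.foldl (pvA_push peta x y r c) st).2
    ∧ (∀ p, pvM x y st.2 p → pvM x y (ds.foldl (pvA_push peta x y r c) st).2 p)
    ∧ (∀ q, q ∈ st.1 → q ∈ (ds.foldl (pvA_push peta x y r c) st).1)
    ∧ (∀ p, pvM x y (ds.foldl (pvA_push peta x y r c) st).2 p →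
        pvM x y st.2 p ∨ (∃ d ∈ pvA_arah, p = (r + d.1, c + d.2) ∧ pvWat peta x y p ∧
          p ∈ (ds.foldl (pvA_push peta x y r c) st).1 ∧ ¬ pvM x y st.2 p))
    ∧ (∀ q, q ∈ (ds.foldl (pvA_push peta x y r c) st).1 →
        q ∈ st.1 ∨ (∃ d ∈ pvA_arah, q = (r + d.1, c + d.2) ∧ pvWat peta x y q ∧
          pvM x y (ds.foldl (pvA_push peta x y r c) st).2 q ∧ ¬ pvM x y st.2 q))
    ∧ (∀ d ∈ ds, pvWat peta x y (r + d.1, c + d.2) →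
        pvM x y (ds.foldl (pvA_push peta x y r c) st).2 (r + d.1, c + d.2)) := by
  intro ds
  induction ds with
  | nil =>
    intro st _ hsh
    refine ⟨hsh, fun p h => h, fun q h => h, fun p h => Or.inl h, fun q h => Or.inl h, ?_⟩
    intro d hd
    simp at hd
  | cons d0 ds ih =>
    intro st hds hsh
    simp only [List.foldl_cons]
    set st1 := pvA_push peta x y r c st d0 with hst1
    have hd0 : d0 ∈ pvA_arah := hds d0 List.mem_cons_self
    have hsh1 : pvShape x y st1.2 := pvA_push_shape peta x y r c st d0 hsh
    obtain ⟨C1, C2, C3, C4, C5, C6⟩ := ih st1 (fun d hd => hds d (List.mem_cons_of_mem _ hd)) hsh1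
    refine ⟨C1, ?_, ?_, ?_, ?_, ?_⟩
    · intro p hp
      exact C2 p (pvA_push_M_mono peta x y r c st d0 p hsh hp)
    · intro q hq
      exact C3 q (pvA_push_stack_mono peta x y r c st d0 q hq)
    · intro p hp
      rcases C4 p hp with hmid | ⟨d, hd, heq, hwat, hstk, hnot⟩
      · rcases pvA_push_M_rev peta x y r c st d0 p hsh hmid with hold | ⟨heq, hwat, hnot, hstk, _⟩
        · exact Or.inl hold
        · exact Or.inr ⟨d0, hd0, heq, hwat, C3 p hstk, hnot⟩
      · refine Or.inr ⟨d, hd, heq, hwat, hstk, ?_⟩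
        intro hM
        exact hnot (pvA_push_M_mono peta x y r c st d0 p hsh hM)
    · intro q hq
      rcases C5 q hq with hmid | ⟨d, hd, heq, hwat, hM, hnot⟩
      · rcases pvA_push_stack_rev peta x y r c st d0 q hsh hmid with hold | ⟨heq, hwat, hnot, hM⟩
        · exact Or.inl hold
        · exact Or.inr ⟨d0, hd0, heq, hwat, C2 q hM, hnot⟩
      · refine Or.inr ⟨d, hd, heq, hwat, hM, ?_⟩
        intro hM'
        exact hnot (pvA_push_M_mono peta x y r c st d0 q hsh hM')
    · intro d hd hwat
      rcases List.mem_cons.mp hd with rfl | hd'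
      · exact C2 _ (pvA_push_covers peta x y r c st d hsh hwat)
      · exact C6 d hd' hwat

theorem pvA_dfsLoop_spec (peta : List (List Int)) (x y : Int) :
    ∀ (stack : List (Int × Int)) (vis : List (List Bool)) (flag : Bool),
    pvShape x y vis →
    (∀ p ∈ stack, pvM x y vis p) →
    (∀ p ∈ stack, pvWat peta x y p) →
    (∀ p, pvM x y vis p → pvWat peta x y p) →
    (∀ p q, pvM x y vis p → p ∉ stack → pvAdj peta x y p q → pvM x y vis q) →
    pvShape x y (pvA_dfsLoop peta x y stack vis flag).1
    ∧ (∀ p, pvM x y vis p → pvM x y (pvA_dfsLoop peta x y stack vis flag).1 p)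
    ∧ (∀ p, pvM x y (pvA_dfsLoop peta x y stack vis flag).1 p →
        pvM x y vis p ∨ ∃ s ∈ stack, pvReach peta x y s p)
    ∧ (∀ p q, pvM x y (pvA_dfsLoop peta x y stack vis flag).1 p → pvAdj peta x y p q →
        pvM x y (pvA_dfsLoop peta x y stack vis flag).1 q)
    ∧ (∀ p, pvM x y (pvA_dfsLoop peta x y stack vis flag).1 p → pvWat peta x y p)
    ∧ ((pvA_dfsLoop peta x y stack vis flag).2 = true ↔
        (flag = true ∨ ∃ p, (¬ pvM x y vis p ∨ p ∈ stack) ∧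
          pvM x y (pvA_dfsLoop peta x y stack vis flag).1 p ∧ pvEdge x y p)) := by
  intro stack vis flag
  induction stack, vis, flag using pvA_dfsLoop.induct peta x y with
  | case1 vis flag =>
    intro hsh h2 h2b h3 h4
    simp only [pvA_dfsLoop]
    refine ⟨hsh, fun p h => h, fun p h => Or.inl h, ?_, h3, ?_⟩
    · intro p q hp hadj
      exact h4 p q hp (by simp) hadj
    · constructor
      · intro h
        exact Or.inl h
      · rintro (h | ⟨p, hcond, _, _⟩)
        · exact h
        · rcases hcond with hnot | hmem
          · exact absurd (by assumption) hnot
          · simp at hmem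
  | case2 r c rest vis flag flagp stp IH =>
    intro hsh h2 h2b h3 h4
    have heq : pvA_dfsLoop peta x y ((r, c) :: rest) vis flag
        = pvA_dfsLoop peta x y stp.1 stp.2 flagp := by
      rw [pvA_dfsLoop]
    rw [heq]
    have hwrc : pvWat peta x y (r, c) := h2b (r, c) List.mem_cons_self
    have hMrc : pvM x y vis (r, c) := h2 (r, c) List.mem_cons_self
    obtain ⟨C1, C2, C3, C4, C5, C6⟩ :=
      pvA_fold_facts peta x y r c pvA_arah (rest, vis) (fun d hd => hd) hsh
    have hcov : ∀ q, pvAdj peta x y (r, c) q → pvM x y stp.2 q := by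
      intro q hadj
      have hd : (q.1 - r, q.2 - c) ∈ pvA_arah := hadj.2.2
      have hq : q = (r + (q.1 - r, q.2 - c).1, c + (q.1 - r, q.2 - c).2) := by
        simp
      rw [hq] at hadj ⊢
      exact C6 _ hd hadj.2.1
    have hadj_new : ∀ p, pvWat peta x y p →
        (∃ d ∈ pvA_arah, p = (r + d.1, c + d.2)) → pvAdj peta x y (r, c) p := by
      rintro p hw ⟨d, hd, rfl⟩
      refine ⟨hwrc, hw, ?_⟩
      simpa using hd
    obtain ⟨D1, D2, D3, D4, D5, D6⟩ := IH C1
      (by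
        intro p hp
        rcases C5 p hp with hrest | ⟨d, hd, heq2, hw, hM, _⟩
        · exact C2 p (h2 p (List.mem_cons_of_mem _ hrest))
        · exact hM)
      (by
        intro p hp
        rcases C5 p hp with hrest | ⟨d, hd, heq2, hw, _, _⟩
        · exact h2b p (List.mem_cons_of_mem _ hrest)
        · exact hw)
      (by
        intro p hp
        rcases C4 p hp with hold | ⟨d, hd, heq2, hw, _, _⟩
        · exact h3 p hold
        · exact hw)
      (by
        intro p q hp hpstk hadj
        rcases C4 p hp with hold | ⟨d, hd, heq2, hw, hstk, _⟩
        · have hprest : p ∉ rest := fun hr => hpstk (C3 p hr)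
          by_cases hprc : p = (r, c)
          · subst hprc
            exact hcov q hadj
          · have hnm : p ∉ (r, c) :: rest := by
              intro hmem
              rcases List.mem_cons.mp hmem with h | h
              · exact hprc h
              · exact hprest h
            exact C2 q (h4 p q hold hnm hadj)
        · exact absurd hstk hpstk)
    refine ⟨D1, ?_, ?_, D4, D5, ?_⟩
    · intro p hp
      exact D2 p (C2 p hp)
    · intro p hp
      rcases D3 p hp with hmid | ⟨s, hs, hreach⟩
      · rcases C4 p hmid with hold | ⟨d, hd, heq2, hw, _, _⟩
        · exact Or.inl hold
        · right
          exact ⟨(r, c), List.mem_cons_self,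
            Relation.ReflTransGen.single (hadj_new p hw ⟨d, hd, heq2⟩)⟩
      · rcases C5 s hs with hrest | ⟨d, hd, heq2, hw, _, _⟩
        · exact Or.inr ⟨s, List.mem_cons_of_mem _ hrest, hreach⟩
        · right
          refine ⟨(r, c), List.mem_cons_self, ?_⟩
          exact Relation.ReflTransGen.trans
            (Relation.ReflTransGen.single (hadj_new s hw ⟨d, hd, heq2⟩)) hreach
    · rw [D6]
      constructor
      · rintro (hf | ⟨p, hcond, hMp, hEp⟩)
        · have hf' : (flag || decide (r = 0 ∨ r = x - 1 ∨ c = 0 ∨ c = y - 1)) = true := hf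
          rcases Bool.or_eq_true_iff.mp hf' with hf2 | hf2
          · exact Or.inl hf2
          · right
            refine ⟨(r, c), Or.inr List.mem_cons_self, D2 _ (C2 _ hMrc), ?_⟩
            simpa [pvEdge] using of_decide_eq_true hf2
        · right
          rcases hcond with hnot | hstk
          · refine ⟨p, ?_, hMp, hEp⟩
            left
            intro hM
            exact hnot (C2 p hM)
          · rcases C5 p hstk with hrest | ⟨d, hd, heq2, hw, _, hnotM⟩
            · exact ⟨p, Or.inr (List.mem_cons_of_mem _ hrest), hMp, hEp⟩
            · exact ⟨p, Or.inl hnotM, hMp, hEp⟩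
      · rintro (hf | ⟨p, hcond, hMp, hEp⟩)
        · left
          show (flag || decide (r = 0 ∨ r = x - 1 ∨ c = 0 ∨ c = y - 1)) = true
          rw [hf]
          rfl
        · rcases hcond with hnot | hstk
          · by_cases hMmid : pvM x y stp.2 p
            · rcases C4 p hMmid with hold | ⟨d, hd, heq2, hw, hstk', _⟩
              · exact absurd hold hnot
              · exact Or.inr ⟨p, Or.inr hstk', hMp, hEp⟩
            · exact Or.inr ⟨p, Or.inl hMmid, hMp, hEp⟩
          · rcases List.mem_cons.mp hstk with rfl | hrest
            · left
              show (flag || decide (r = 0 ∨ r = x - 1 ∨ c = 0 ∨ c = y - 1)) = true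
              have hdec : decide (r = 0 ∨ r = x - 1 ∨ c = 0 ∨ c = y - 1) = true :=
                decide_eq_true (by simpa [pvEdge] using hEp)
              rw [hdec, Bool.or_true]
            · exact Or.inr ⟨p, Or.inr (C3 p hrest), hMp, hEp⟩

theorem pvA_dfs_spec (peta : List (List Int)) (x y : Int) (s : Int × Int)
    (vis : List (List Bool))
    (hsh : pvShape x y vis)
    (hwat : ∀ p, pvM x y vis p → pvWat peta x y p)
    (hcl : pvClosed peta x y vis)
    (hs : pvWat peta x y s)
    (hns : ¬ pvM x y vis s) :
    pvShape x y (pvA_dfs peta x y s.1 s.2 vis).1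
    ∧ (∀ p, pvM x y (pvA_dfs peta x y s.1 s.2 vis).1 p ↔
        (pvM x y vis p ∨ pvReach peta x y s p))
    ∧ pvClosed peta x y (pvA_dfs peta x y s.1 s.2 vis).1
    ∧ (∀ p, pvM x y (pvA_dfs peta x y s.1 s.2 vis).1 p → pvWat peta x y p)
    ∧ ((pvA_dfs peta x y s.1 s.2 vis).2 = true ↔
        ∃ p, pvReach peta x y s p ∧ pvEdge x y p) := by
  have hseta : (s.1, s.2) = s := rfl
  have hInR : pvInR x y (s.1, s.2) := by rw [hseta]; exact hs.1
  have hsh1 : pvShape x y (pvA_set vis s.1 s.2) := pvA_shape_set x y vis s.1 s.2 hsh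
  have hMs : pvM x y (pvA_set vis s.1 s.2) s := by
    rw [← hseta]
    exact pvA_M_set_self x y vis s.1 s.2 hsh hInR
  obtain ⟨D1, D2, D3, D4, D5, D6⟩ := pvA_dfsLoop_spec peta x y [(s.1, s.2)]
    (pvA_set vis s.1 s.2) false hsh1
    (by
      intro p hp
      rcases List.mem_singleton.mp hp with rfl
      exact hMs)
    (by
      intro p hp
      rcases List.mem_singleton.mp hp with rfl
      exact hs)
    (by
      intro p hp
      rcases pvA_M_set_rev x y vis s.1 s.2 p hsh hInR hp with rfl | hM
      · exact hs
      · exact hwat p hM)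
    (by
      intro p q hp hpstk hadj
      have hps : p ≠ s := by
        intro h
        rw [← hseta] at h
        exact hpstk (by rw [h]; exact List.mem_singleton_self _)
      rcases pvA_M_set_rev x y vis s.1 s.2 p hsh hInR hp with heq | hM
      · exact absurd (by rw [heq, hseta]) hps
      · exact pvA_M_set_mono x y vis s.1 s.2 q hsh hInR (hcl p q hM hadj))
  have hdisj : ∀ p, pvReach peta x y s p → ¬ pvM x y vis p := by
    intro p hreach hMp
    exact hns (pvReach_closed peta x y hcl p s hMp (pvReach_symm peta x y s p hreach))
  have hMiff : ∀ p, pvM x y (pvA_dfs peta x y s.1 s.2 vis).1 p ↔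
      (pvM x y vis p ∨ pvReach peta x y s p) := by
    intro p
    constructor
    · intro hp
      rcases D3 p hp with hM1 | ⟨t, ht, hreach⟩
      · rcases pvA_M_set_rev x y vis s.1 s.2 p hsh hInR hM1 with heq | hM
        · right
          rw [heq, hseta]
          exact Relation.ReflTransGen.refl
        · exact Or.inl hM
      · rcases List.mem_singleton.mp ht with rfl
        exact Or.inr (by rwa [hseta] at hreach)
    · rintro (hM | hreach)
      · exact D2 p (pvA_M_set_mono x y vis s.1 s.2 p hsh hInR hM)
      · exact pvReach_closed peta x y D4 s p (D2 s hMs) hreach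
  refine ⟨D1, hMiff, D4, D5, ?_⟩
  simp only [pvA_dfs]
  rw [D6]
  constructor
  · rintro (hf | ⟨p, hcond, hMp, hEp⟩)
    · exact absurd hf (by simp)
    · refine ⟨p, ?_, hEp⟩
      rcases hcond with hnot | hstk
      · rcases (hMiff p).mp hMp with hM | hreach
        · exact absurd (pvA_M_set_mono x y vis s.1 s.2 p hsh hInR hM) hnot
        · exact hreach
      · rcases List.mem_singleton.mp hstk with rfl
        rw [hseta]
        exact Relation.ReflTransGen.refl
  · rintro ⟨p, hreach, hEp⟩
    right
    refine ⟨p, ?_, (hMiff p).mpr (Or.inr hreach), hEp⟩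
    by_cases hps : p = s
    · right
      rw [hps, hseta]
      exact List.mem_singleton_self _
    · left
      intro hM1
      rcases pvA_M_set_rev x y vis s.1 s.2 p hsh hInR hM1 with heq | hM
      · exact hps (by rw [heq, hseta])
      · exact hdisj p hreach hM

theorem pvB_mem_expand (frontier water comp : PySem.Set (Int × Int)) (q : Int × Int) :
    q ∈ pvB_expand frontier water comp ↔
      ((∃ p ∈ frontier, ∃ d ∈ pvB_arah, q = (p.1 + d.1, p.2 + d.2)) ∧
        q ∈ water ∧ q ∉ comp) := by
  unfold pvB_expand
  rw [PySem.Set.mem_diff, PySem.Set.mem_inter, PySem.Set.mem_ofList]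
  simp only [List.mem_flatMap, List.mem_map]
  constructor
  · rintro ⟨⟨⟨p, hp, d, hd, rfl⟩, hwq⟩, hnc⟩
    exact ⟨⟨p, hp, d, hd, rfl⟩, hwq, hnc⟩
  · rintro ⟨⟨p, hp, d, hd, rfl⟩, hwq, hnc⟩
    exact ⟨⟨⟨p, hp, d, hd, rfl⟩, hwq⟩, hnc⟩

theorem pvB_arah_eq : pvB_arah = pvA_arah := rfl

theorem pvB_bfsLoop_spec (peta : List (List Int)) (x y : Int)
    (water : PySem.Set (Int × Int))
    (hw : ∀ p, p ∈ water ↔ pvWat peta x y p) (s : Int × Int) :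
    ∀ (frontier comp : PySem.Set (Int × Int)),
    (∀ p ∈ frontier, p ∈ comp) →
    (∀ p ∈ comp, pvWat peta x y p) →
    (∀ p ∈ comp, pvReach peta x y s p) →
    (∀ p q, p ∈ comp → p ∉ frontier → pvAdj peta x y p q → q ∈ comp) →
    s ∈ comp →
    ∀ p, (p ∈ pvB_bfsLoop water frontier comp ↔ pvReach peta x y s p) := by
  intro frontier comp
  induction frontier, comp using pvB_bfsLoop.induct water with
  | case1 frontier comp hempty =>
    intro hfc hwat hreach hcl hs p
    rw [show pvB_bfsLoop water frontier comp = comp from by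
      rw [pvB_bfsLoop, if_pos hempty]]
    have hfr : frontier = [] := List.isEmpty_iff.mp hempty
    subst hfr
    constructor
    · exact hreach p
    · intro hr
      exact pvReach_closed peta x y
        (W := fun q => q ∈ comp)
        (fun a b ha hadj => hcl a b ha (by simp) hadj) s p hs hr
  | case2 frontier comp hempty f' IH =>
    intro hfc hwat hreach hcl hs p
    rw [show pvB_bfsLoop water frontier comp
        = pvB_bfsLoop water f' (PySem.Set.union comp f') from by
      rw [pvB_bfsLoop, if_neg hempty]]
    have hf'w : ∀ q ∈ f', q ∈ water ∧ q ∉ comp ∧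
        ∃ p0 ∈ frontier, pvAdj peta x y p0 q := by
      intro q hq
      obtain ⟨⟨p0, hp0, d, hd, rfl⟩, hwq, hnc⟩ := (pvB_mem_expand frontier water comp q).mp hq
      refine ⟨hwq, hnc, p0, hp0, ?_⟩
      refine ⟨hwat p0 (hfc p0 hp0), (hw _).mp hwq, ?_⟩
      rw [pvB_arah_eq] at hd
      simpa using hd
    refine IH ?_ ?_ ?_ ?_ ?_ p
    · intro q hq
      exact (PySem.Set.mem_union _ _ _).mpr (Or.inr hq)
    · intro q hq
      rcases (PySem.Set.mem_union _ _ _).mp hq with hq | hq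
      · exact hwat q hq
      · exact (hw q).mp (hf'w q hq).1
    · intro q hq
      rcases (PySem.Set.mem_union _ _ _).mp hq with hq | hq
      · exact hreach q hq
      · obtain ⟨_, _, p0, hp0, hadj⟩ := hf'w q hq
        exact Relation.ReflTransGen.tail (hreach p0 (hfc p0 hp0)) hadj
    · intro a b ha hnf hadj
      rcases (PySem.Set.mem_union _ _ _).mp ha with ha | ha
      · by_cases haf : a ∈ frontier
        · -- b is a water neighbour of a frontier cell: b ∈ comp or b ∈ f'
          by_cases hbc : b ∈ comp
          · exact (PySem.Set.mem_union _ _ _).mpr (Or.inl hbc)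
          · refine (PySem.Set.mem_union _ _ _).mpr (Or.inr ?_)
            refine (pvB_mem_expand frontier water comp b).mpr ⟨⟨a, haf,
              (b.1 - a.1, b.2 - a.2), ?_, by simp⟩, (hw b).mpr hadj.2.1, hbc⟩
            rw [pvB_arah_eq]
            exact hadj.2.2
        · exact (PySem.Set.mem_union _ _ _).mpr (Or.inl (hcl a b ha haf hadj))
      · exact absurd ha hnf
    · exact (PySem.Set.mem_union _ _ _).mpr (Or.inl hs)

theorem pvB_component_spec (peta : List (List Int)) (x y : Int)
    (water : PySem.Set (Int × Int))
    (hw : ∀ p, p ∈ water ↔ pvWat peta x y p) (s : Int × Int)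
    (hs : pvWat peta x y s) :
    ∀ p, p ∈ pvB_component water s ↔ pvReach peta x y s p := by
  intro p
  unfold pvB_component
  have hmem : ∀ q, q ∈ PySem.Set.add (PySem.Set.empty (α := Int × Int)) s ↔ q = s := by
    intro q
    rw [PySem.Set.mem_add]
    simp [PySem.Set.empty]
  refine pvB_bfsLoop_spec peta x y water hw s _ _ ?_ ?_ ?_ ?_ ?_ p
  · exact fun q hq => hq
  · intro q hq
    rw [hmem q] at hq
    subst hq
    exact hs
  · intro q hq
    rw [hmem q] at hq
    subst hq
    exact Relation.ReflTransGen.refl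
  · intro a b ha hnf _
    exact absurd ha hnf
  · exact (hmem s).mpr rfl

theorem pvB_water_inner (peta : List (List Int)) (i : Int) (q : Int × Int) :
    ∀ (l : List Int) (w : PySem.Set (Int × Int)),
    q ∈ l.foldl (fun (w : PySem.Set (Int × Int)) j =>
        if pvWater peta i j = true then PySem.Set.add w (i, j) else w) w ↔
      q ∈ w ∨ ∃ j ∈ l, q = (i, j) ∧ pvWater peta i j = true := by
  intro l
  induction l with
  | nil => intro w; simp
  | cons j l ih =>
    intro w
    simp only [List.foldl_cons]
    rw [ih]
    by_cases hc : pvWater peta i j = true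
    · rw [if_pos hc, PySem.Set.mem_add]
      constructor
      · rintro (⟨hw | rfl⟩ | ⟨j', hj', rfl, hc'⟩)
        · exact Or.inl hw
        · exact Or.inr ⟨j, List.mem_cons_self, rfl, hc⟩
        · exact Or.inr ⟨j', List.mem_cons_of_mem _ hj', rfl, hc'⟩
      · rintro (hw | ⟨j', hj', rfl, hc'⟩)
        · exact Or.inl (Or.inl hw)
        · rcases List.mem_cons.mp hj' with rfl | hj''
          · exact Or.inl (Or.inr rfl)
          · exact Or.inr ⟨j', hj'', rfl, hc'⟩
    · rw [if_neg hc]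
      constructor
      · rintro (hw | ⟨j', hj', rfl, hc'⟩)
        · exact Or.inl hw
        · exact Or.inr ⟨j', List.mem_cons_of_mem _ hj', rfl, hc'⟩
      · rintro (hw | ⟨j', hj', rfl, hc'⟩)
        · exact Or.inl hw
        · rcases List.mem_cons.mp hj' with rfl | hj''
          · exact absurd hc' hc
          · exact Or.inr ⟨j', hj'', rfl, hc'⟩

theorem pvB_water_char (peta : List (List Int)) (x y : Int) (q : Int × Int) :
    q ∈ (PySem.List.pyRange 0 x 1).foldl (fun w i =>
        (PySem.List.pyRange 0 y 1).foldl (fun (w : PySem.Set (Int × Int)) j =>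
          if pvWater peta i j = true then PySem.Set.add w (i, j) else w) w)
        PySem.Set.empty ↔ pvWat peta x y q := by
  have houter : ∀ (lx : List Int) (w : PySem.Set (Int × Int)),
      q ∈ lx.foldl (fun w i =>
        (PySem.List.pyRange 0 y 1).foldl (fun (w : PySem.Set (Int × Int)) j =>
          if pvWater peta i j = true then PySem.Set.add w (i, j) else w) w) w ↔
      q ∈ w ∨ ∃ i ∈ lx, ∃ j ∈ PySem.List.pyRange 0 y 1, q = (i, j) ∧ pvWater peta i j = true := by
    intro lx
    induction lx with
    | nil => intro w; simp
    | cons i lx ih =>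
      intro w
      simp only [List.foldl_cons]
      rw [ih, pvB_water_inner]
      constructor
      · rintro ((hw | ⟨j, hj, rfl, hc⟩) | ⟨i', hi', j', hj', rfl, hc'⟩)
        · exact Or.inl hw
        · exact Or.inr ⟨i, List.mem_cons_self, j, hj, rfl, hc⟩
        · exact Or.inr ⟨i', List.mem_cons_of_mem _ hi', j', hj', rfl, hc'⟩
      · rintro (hw | ⟨i', hi', j', hj', rfl, hc'⟩)
        · exact Or.inl (Or.inl hw)
        · rcases List.mem_cons.mp hi' with rfl | hi''
          · exact Or.inl (Or.inr ⟨j', hj', rfl, hc'⟩)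
          · exact Or.inr ⟨i', hi'', j', hj', rfl, hc'⟩
  rw [houter]
  simp only [PySem.Set.empty, List.not_mem_nil, false_or, PySem.List.mem_pyRange_one]
  constructor
  · rintro ⟨i, hi, j, hj, rfl, hc⟩
    exact ⟨⟨hi.1, hi.2, hj.1, hj.2⟩, hc⟩
  · rintro ⟨⟨h1, h2, h3, h4⟩, hc⟩
    exact ⟨q.1, ⟨h1, h2⟩, q.2, ⟨h3, h4⟩, rfl, hc⟩

def pvInv (peta : List (List Int)) (x y : Int)
    (sA : Int × List (List Bool)) (sB : Int × PySem.Set (Int × Int)) : Prop :=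
  sA.1 = sB.1 ∧ pvShape x y sA.2 ∧ (∀ p, pvM x y sA.2 p ↔ p ∈ sB.2)
    ∧ (∀ p, pvM x y sA.2 p → pvWat peta x y p) ∧ pvClosed peta x y sA.2

theorem pvLockstep {σ τ : Type} (Inv : σ → τ → Prop) (l : List Int)
    (fA : σ → Int → σ) (fB : τ → Int → τ)
    (h : ∀ i ∈ l, ∀ sA sB, Inv sA sB → Inv (fA sA i) (fB sB i)) :
    ∀ sA sB, Inv sA sB → Inv (l.foldl fA sA) (l.foldl fB sB) := by
  induction l with
  | nil => intro sA sB hI; exact hI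
  | cons i l ih =>
    intro sA sB hI
    simp only [List.foldl_cons]
    exact ih (fun i' hi' => h i' (List.mem_cons_of_mem _ hi')) _ _
      (h i List.mem_cons_self sA sB hI)

theorem pvCell (peta : List (List Int)) (x y : Int)
    (water : PySem.Set (Int × Int))
    (hw : ∀ p, p ∈ water ↔ pvWat peta x y p)
    (i j : Int) (hi : 0 ≤ i ∧ i < x) (hj : 0 ≤ j ∧ j < y)
    (sA : Int × List (List Bool)) (sB : Int × PySem.Set (Int × Int))
    (hInv : pvInv peta x y sA sB) :
    pvInv peta x y
      (if pvWater peta i j = true ∧ pvA_get sA.2 i j = false then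
        ((if (pvA_dfs peta x y i j sA.2).2 then sA.1 else sA.1 + 1), (pvA_dfs peta x y i j sA.2).1)
      else sA)
      (if PySem.Set.contains water (i, j) = true ∧ PySem.Set.contains sB.2 (i, j) = false then
        ((if (pvB_component water (i, j)).all
            (fun p => decide (0 < p.1 ∧ p.1 < x - 1 ∧ 0 < p.2 ∧ p.2 < y - 1)) then
          sB.1 + 1 else sB.1), PySem.Set.union sB.2 (pvB_component water (i, j)))
      else sB) := by
  obtain ⟨hcnt, hsh, hMiff, hMwat, hcl⟩ := hInv
  have hInRij : pvInR x y (i, j) := ⟨hi.1, hi.2, hj.1, hj.2⟩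
  have hcond : (pvWater peta i j = true ∧ pvA_get sA.2 i j = false) ↔
      (PySem.Set.contains water (i, j) = true ∧ PySem.Set.contains sB.2 (i, j) = false) := by
    constructor
    · rintro ⟨hwij, hg⟩
      refine ⟨(PySem.Set.contains_iff _ _).mpr ((hw _).mpr ⟨hInRij, hwij⟩), ?_⟩
      rw [← Bool.not_eq_true, PySem.Set.contains_iff]
      intro hmem
      have := (hMiff (i, j)).mpr hmem
      rw [this.2] at hg
      exact absurd hg (by simp)
    · rintro ⟨hcw, hcs⟩
      have hwij : pvWat peta x y (i, j) := (hw _).mp ((PySem.Set.contains_iff _ _).mp hcw)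
      refine ⟨hwij.2, ?_⟩
      rw [← Bool.not_eq_true, PySem.Set.contains_iff] at hcs
      have hnM : ¬ pvM x y sA.2 (i, j) := fun hM => hcs ((hMiff (i, j)).mp hM)
      rcases Bool.eq_false_or_eq_true (pvA_get sA.2 i j) with hg | hg
      · exact absurd ⟨hInRij, hg⟩ hnM
      · exact hg
  by_cases hA : pvWater peta i j = true ∧ pvA_get sA.2 i j = false
  · rw [if_pos hA, if_pos (hcond.mp hA)]
    have hwats : pvWat peta x y (i, j) := ⟨hInRij, hA.1⟩
    have hnM : ¬ pvM x y sA.2 (i, j) := by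
      intro hM
      rw [hM.2] at hA
      exact absurd hA.2 (by simp)
    obtain ⟨E1, E2, E3, E4, E5⟩ :=
      pvA_dfs_spec peta x y (i, j) sA.2 hsh hMwat hcl hwats hnM
    dsimp only at E1 E2 E3 E4 E5
    have hcomp := pvB_component_spec peta x y water hw (i, j) hwats
    have hall : ((pvB_component water (i, j)).all
        (fun p => decide (0 < p.1 ∧ p.1 < x - 1 ∧ 0 < p.2 ∧ p.2 < y - 1)) = true) ↔
        ∀ p, pvReach peta x y (i, j) p → ¬ pvEdge x y p := by
      rw [List.all_eq_true]
      constructor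
      · intro h p hreach
        have := of_decide_eq_true (h p ((hcomp p).mpr hreach))
        intro hedge
        unfold pvEdge at hedge
        omega
      · intro h p hp
        have hreach := (hcomp p).mp hp
        have hwp := pvReach_wat peta x y (i, j) p hwats hreach
        have hne := h p hreach
        obtain ⟨⟨w1, w2, w3, w4⟩, _⟩ := hwp
        refine decide_eq_true ?_
        unfold pvEdge at hne
        push Not at hne
        omega
    have hflag : (pvA_dfs peta x y i j sA.2).2 = true ↔
        ¬ ((pvB_component water (i, j)).all
          (fun p => decide (0 < p.1 ∧ p.1 < x - 1 ∧ 0 < p.2 ∧ p.2 < y - 1)) = true) := by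
      rw [E5, hall]
      constructor
      · rintro ⟨p, hreach, hedge⟩ hforall
        exact hforall p hreach hedge
      · intro h
        by_contra hne
        push Not at hne
        exact h hne
    refine ⟨?_, E1, ?_, E4, E3⟩
    · by_cases hf : (pvA_dfs peta x y i j sA.2).2 = true
      · have hallf : ((pvB_component water (i, j)).all
            (fun p => decide (0 < p.1 ∧ p.1 < x - 1 ∧ 0 < p.2 ∧ p.2 < y - 1))) = false := by
          have := hflag.mp hf
          simp only [Bool.not_eq_true] at this
          exact this
        simp only [hf, hallf]
        simp [hcnt]
      · have hff : (pvA_dfs peta x y i j sA.2).2 = false := by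
          simpa using hf
        have hallt : ((pvB_component water (i, j)).all
            (fun p => decide (0 < p.1 ∧ p.1 < x - 1 ∧ 0 < p.2 ∧ p.2 < y - 1))) = true := by
          by_contra hc
          exact hf (hflag.mpr hc)
        simp only [hff, hallt]
        simp [hcnt]
    · intro p
      rw [E2 p, PySem.Set.mem_union, hMiff p, hcomp p]
  · rw [if_neg hA, if_neg (fun hB => hA (hcond.mpr hB))]
    exact ⟨hcnt, hsh, hMiff, hMwat, hcl⟩

theorem pvA_shape_replicate (x y : Int) :
    pvShape x y (List.replicate x.toNat (List.replicate y.toNat false)) := by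
  refine ⟨by simp, ?_⟩
  intro row hrow
  rw [List.eq_of_mem_replicate hrow]
  simp

theorem pvA_get_replicate (x y : Int) (p : Int × Int) (h : pvInR x y p) :
    pvA_get (List.replicate x.toNat (List.replicate y.toNat false)) p.1 p.2 = false := by
  obtain ⟨h1, h2, h3, h4⟩ := h
  unfold pvA_get
  rw [if_pos ⟨h1, h3⟩]
  have e1 : (List.replicate x.toNat (List.replicate y.toNat false)).getD p.1.toNat []
      = List.replicate y.toNat false := by
    rw [List.getD_eq_getElem?_getD, List.getElem?_replicate]
    rw [if_pos (by omega)]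
    rfl
  rw [e1, List.getD_eq_getElem?_getD, List.getElem?_replicate, if_pos (by omega)]
  rfl

theorem pvInit (peta : List (List Int)) (x y : Int) :
    pvInv peta x y ((0 : Int), List.replicate x.toNat (List.replicate y.toNat false))
      ((0 : Int), PySem.Set.empty) := by
  have hget : ∀ p, ¬ pvM x y (List.replicate x.toNat (List.replicate y.toNat false)) p := by
    intro p hM
    have := pvA_get_replicate x y p hM.1
    rw [hM.2] at this
    exact absurd this (by simp)
  refine ⟨rfl, pvA_shape_replicate x y, ?_, ?_, ?_⟩
  · intro p
    constructor
    · intro hM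
      exact absurd hM (hget p)
    · intro hp
      simp [PySem.Set.empty] at hp
  · intro p hM
    exact absurd hM (hget p)
  · intro p q hM _
    exact absurd hM (hget p)

theorem pvMainAux (peta : List (List Int)) (x y : Int) (W : PySem.Set (Int × Int))
    (hw : ∀ p, p ∈ W ↔ pvWat peta x y p) :
    hitungDanau peta x y =
      ((PySem.List.pyRange 0 x 1).foldl (fun st i =>
        (PySem.List.pyRange 0 y 1).foldl (fun (st : Int × PySem.Set (Int × Int)) j =>
          if PySem.Set.contains W (i, j) = true ∧ PySem.Set.contains st.2 (i, j) = false then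
            let comp := pvB_component W (i, j)
            (if comp.all (fun p => decide (0 < p.1 ∧ p.1 < x - 1 ∧ 0 < p.2 ∧ p.2 < y - 1)) then
              st.1 + 1
            else st.1,
            PySem.Set.union st.2 comp)
          else st) st) ((0 : Int), PySem.Set.empty)).1 := by
  have key := pvLockstep (pvInv peta x y) (PySem.List.pyRange 0 x 1)
    (fun st i =>
      (PySem.List.pyRange 0 y 1).foldl (fun (st : Int × List (List Bool)) j =>
        if pvWater peta i j = true ∧ pvA_get st.2 i j = false then
          let r := pvA_dfs peta x y i j st.2
          (if r.2 then st.1 else st.1 + 1, r.1)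
        else st) st)
    (fun st i =>
      (PySem.List.pyRange 0 y 1).foldl (fun (st : Int × PySem.Set (Int × Int)) j =>
        if PySem.Set.contains W (i, j) = true ∧ PySem.Set.contains st.2 (i, j) = false then
          let comp := pvB_component W (i, j)
          (if comp.all (fun p => decide (0 < p.1 ∧ p.1 < x - 1 ∧ 0 < p.2 ∧ p.2 < y - 1)) then
            st.1 + 1
          else st.1,
          PySem.Set.union st.2 comp)
        else st) st)
    (by
      intro i hi sA sB hInv
      have hib := PySem.List.mem_pyRange_one.mp hi
      exact pvLockstep (pvInv peta x y) (PySem.List.pyRange 0 y 1) _ _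
        (by
          intro j hj sA' sB' hInv'
          have hjb := PySem.List.mem_pyRange_one.mp hj
          exact pvCell peta x y W hw i j hib hjb sA' sB' hInv')
        sA sB hInv)
    ((0 : Int), List.replicate x.toNat (List.replicate y.toNat false))
    ((0 : Int), PySem.Set.empty) (pvInit peta x y)
  exact key.1

theorem pvMain (peta : List (List Int)) (x y : Int) :
    hitungDanau peta x y = hitungDanau_alt peta x y := by
  rw [pvMainAux peta x y _ (pvB_water_char peta x y)]
  rfl

-- ===== VERDICT (by name: the statement is the Claim_ definition above) =====
theorem hitungDanau_spec : Claim_equal_hitungDanau := by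
  unfold Claim_equal_hitungDanau
  intro peta x y _ _
  unfold Spec_hitungDanau
  exact pvMain peta x y
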